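-- pv_equiv track=rewrite | github.com/MrBrantCode/unitest_baseline | mut_generate/mist_train_cf/cf_10005/solution.py | fibonacci_numbers_divisible_by_three
-- ===== SOURCE A (Python) =====
-- def fibonacci_numbers_divisible_by_three(n):
--     fib_numbers = []
--     a, b = 0, 1
--     count = 0
--     while count < n:
--         if a % 3 == 0:
--             fib_numbers.append(a)
--             count += 1
--         a, b = b, a + b
--     return fib_numbers
-- ===== SOURCE B (Python) =====
-- def fibonacci_numbers_divisible_by_three(n):
--     # Every 4th Fibonacci number (F_0, F_4, F_8, ...) is exactly the
--     # divisible-by-three subsequence; it obeys G_k = 7*G_{k-1} - G_{k-2}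
--     # with seeds 0, 3, so generate it directly with no modulo filtering.
--     res = []
--     a, b = 0, 3
--     for _ in range(n):
--         res.append(a)
--         a, b = b, 7 * b - a
--     return res
-- ===== Notes on version B (the rewrite author's own statement) =====
-- stated objective: alternative
-- what changed: B generates the divisible-by-three Fibonacci subsequence directly via its own recurrence G_k = 7*G_{k-1} - G_{k-2} (seeds 0, 3), looping once per output term, instead of A's walk over all Fibonacci numbers with a modulo-3 filter.
import Mathlib
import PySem

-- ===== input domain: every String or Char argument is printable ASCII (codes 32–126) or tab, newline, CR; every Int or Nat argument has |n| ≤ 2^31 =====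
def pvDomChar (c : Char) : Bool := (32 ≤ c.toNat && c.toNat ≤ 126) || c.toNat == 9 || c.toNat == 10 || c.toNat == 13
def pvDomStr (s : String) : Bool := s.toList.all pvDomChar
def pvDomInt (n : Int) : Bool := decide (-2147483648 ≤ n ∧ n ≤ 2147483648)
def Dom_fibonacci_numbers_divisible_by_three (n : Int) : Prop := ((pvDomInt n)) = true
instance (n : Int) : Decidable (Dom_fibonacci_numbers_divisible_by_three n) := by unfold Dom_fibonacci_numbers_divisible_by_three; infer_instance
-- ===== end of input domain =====

-- B replaces A's filter over all Fibonacci numbers by the direct recurrence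
-- G_k = 7*G_{k-1} - G_{k-2} (seeds 0, 3) for the divisible-by-three subsequence:
-- one loop step per output term, no mod tests (objective: alternative algorithm).

-- ===== PORT A =====
-- A's while loop; fuel 4*n+1 bounds its body executions (proved sufficient below),
-- so the port computes A's value.
def pvLoopA (fuel : Nat) (acc : List Int) (a b count n : Int) : List Int :=
  match fuel with
  | 0 => acc
  | fuel + 1 =>
    if count < n then
      if PySem.Int.mod a 3 = 0 then
        pvLoopA fuel (acc ++ [a]) b (a + b) (count + 1) n
      else
        pvLoopA fuel acc b (a + b) count n
    else acc

def fibonacci_numbers_divisible_by_three (n : Int) : List Int :=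
  pvLoopA (4 * n.toNat + 1) [] 0 1 0 n

-- ===== PORT B =====
-- Source B's for-loop over range(n): executes n.toNat times.
def pvLoopB (m : Nat) (res : List Int) (a b : Int) : List Int :=
  match m with
  | 0 => res
  | m + 1 => pvLoopB m (res ++ [a]) b (7 * b - a)

def fibonacci_numbers_divisible_by_three_alt (n : Int) : List Int :=
  pvLoopB n.toNat [] 0 3

-- ===== PRECONDITION & SPEC =====
def Spec_fibonacci_numbers_divisible_by_three (n : Int) (out : List Int) : Prop := out = fibonacci_numbers_divisible_by_three_alt n
instance (n : Int) (out : List Int) : Decidable (Spec_fibonacci_numbers_divisible_by_three n out) := by unfold Spec_fibonacci_numbers_divisible_by_three; infer_instance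

-- ===== CLAIM (what is proved, stated in full; the proofs are below) =====
def Claim_equal_fibonacci_numbers_divisible_by_three : Prop := ∀ (n : Int), Dom_fibonacci_numbers_divisible_by_three n → Spec_fibonacci_numbers_divisible_by_three n (fibonacci_numbers_divisible_by_three n)

-- ===== LEMMAS AND PROOFS =====

-- reference Fibonacci sequence (Int-valued)
def pvFib : Nat → Int
  | 0 => 0
  | 1 => 1
  | m + 2 => pvFib m + pvFib (m + 1)

lemma pvFib_step (m : Nat) : pvFib (m + 2) = pvFib m + pvFib (m + 1) := rfl

lemma pvLoopA_succ (fuel : Nat) (acc : List Int) (a b count n : Int) :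
    pvLoopA (fuel + 1) acc a b count n =
      if count < n then
        if PySem.Int.mod a 3 = 0 then
          pvLoopA fuel (acc ++ [a]) b (a + b) (count + 1) n
        else
          pvLoopA fuel acc b (a + b) count n
      else acc := rfl

-- mod-3 pattern of Fibonacci: F(4k) ≡ 0 and F(4k+1) ≢ 0 (mod 3)
lemma pvFib_at (a c : Nat) (h : c = a + 2) : pvFib c = pvFib a + pvFib (a + 1) := by
  subst h; rfl

lemma pvFib_mod (k : Nat) :
    pvFib (4 * k) % 3 = 0 ∧ (pvFib (4 * k + 1) % 3 = 1 ∨ pvFib (4 * k + 1) % 3 = 2) := by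
  induction k with
  | zero => decide
  | succ k ih =>
    have e2 : pvFib (4 * k + 2) = pvFib (4 * k) + pvFib (4 * k + 1) := by
      have h := pvFib_at (4 * k) (4 * k + 2) (by omega); exact h
    have e3 : pvFib (4 * k + 3) = pvFib (4 * k + 1) + pvFib (4 * k + 2) := by
      have h := pvFib_at (4 * k + 1) (4 * k + 3) (by omega)
      rw [show 4 * k + 1 + 1 = 4 * k + 2 from by omega] at h; exact h
    have e4 : pvFib (4 * k + 4) = pvFib (4 * k + 2) + pvFib (4 * k + 3) := by
      have h := pvFib_at (4 * k + 2) (4 * k + 4) (by omega)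
      rw [show 4 * k + 2 + 1 = 4 * k + 3 from by omega] at h; exact h
    have e5 : pvFib (4 * k + 5) = pvFib (4 * k + 3) + pvFib (4 * k + 4) := by
      have h := pvFib_at (4 * k + 3) (4 * k + 5) (by omega)
      rw [show 4 * k + 3 + 1 = 4 * k + 4 from by omega] at h; exact h
    rw [show 4 * (k + 1) + 1 = 4 * k + 5 from by omega,
        show 4 * (k + 1) = 4 * k + 4 from by omega, e5, e4, e3, e2]
    omega

-- the subsequence recurrence: F(m+8) = 7*F(m+4) - F(m)
lemma pvFib_add8 (m : Nat) : pvFib (m + 8) = 7 * pvFib (m + 4) - pvFib m := by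
  induction m using Nat.twoStepInduction with
  | zero => decide
  | one => decide
  | more m ih1 ih2 =>
    have eA : pvFib (m + 2 + 8) = pvFib (m + 8) + pvFib (m + 9) := by
      have h := pvFib_at (m + 8) (m + 2 + 8) (by omega)
      rw [show m + 8 + 1 = m + 9 from by omega] at h; exact h
    have eB : pvFib (m + 9) = 7 * pvFib (m + 5) - pvFib (m + 1) := by
      have h := ih2
      rw [show m + 1 + 8 = m + 9 from by omega, show m + 1 + 4 = m + 5 from by omega] at h
      exact h
    have e6 : pvFib (m + 2 + 4) = pvFib (m + 4) + pvFib (m + 5) := by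
      have h := pvFib_at (m + 4) (m + 2 + 4) (by omega)
      rw [show m + 4 + 1 = m + 5 from by omega] at h; exact h
    have e2 : pvFib (m + 2) = pvFib m + pvFib (m + 1) := pvFib_step _
    rw [eA, eB, ih1, e6, e2]
    ring

lemma pvMapShift (j k : Nat) :
    pvFib (4 * k) :: (List.range j).map (fun i => pvFib (4 * (k + 1 + i)))
      = (List.range (j + 1)).map (fun i => pvFib (4 * (k + i))) := by
  rw [List.range_succ_eq_map, List.map_cons, List.map_map]
  simp only [Nat.add_zero]
  congr 1
  apply List.map_congr_left
  intro i _
  simp only [Function.comp_apply]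
  congr 1
  omega

lemma pvLoopA_spec (j : Nat) : ∀ (k : Nat) (acc : List Int) (n : Int),
    pvLoopA (4 * j + 1) acc (pvFib (4 * k)) (pvFib (4 * k + 1)) (n - j) n
      = acc ++ (List.range j).map (fun i => pvFib (4 * (k + i))) := by
  induction j with
  | zero =>
    intro k acc n
    simp [pvLoopA_succ]
  | succ j ih =>
    intro k acc n
    have hm := pvFib_mod k
    have hmod0 : PySem.Int.mod (pvFib (4 * k)) 3 = 0 := by
      rw [PySem.Int.mod_eq_emod_of_pos (by omega)]; exact hm.1
    have hlt : n - (↑(j + 1) : Int) < n := by push_cast; omega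
    rw [show 4 * (j + 1) + 1 = (4 * j + 4) + 1 from by omega, pvLoopA_succ,
        if_pos hlt, if_pos hmod0]
    have hc1 : n - (↑(j + 1) : Int) + 1 = n - ↑j := by push_cast; ring
    rw [hc1]
    have e2 : pvFib (4 * k) + pvFib (4 * k + 1) = pvFib (4 * k + 2) := by
      have h := pvFib_at (4 * k) (4 * k + 2) (by omega); exact h.symm
    rw [e2]
    cases j with
    | zero =>
      have hstop : ¬ (n - ((0 : Nat) : Int) < n) := by push_cast; omega
      rw [show (4 * 0 + 4 : Nat) = 3 + 1 from rfl, pvLoopA_succ, if_neg hstop]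
      simp
    | succ j' =>
      have hlt' : n - (↑(j' + 1) : Int) < n := by push_cast; omega
      have hne1 : ¬ PySem.Int.mod (pvFib (4 * k + 1)) 3 = 0 := by
        rw [PySem.Int.mod_eq_emod_of_pos (by omega)]; omega
      have e3 : pvFib (4 * k + 1) + pvFib (4 * k + 2) = pvFib (4 * k + 3) := by
        have h := pvFib_at (4 * k + 1) (4 * k + 3) (by omega)
        rw [show 4 * k + 1 + 1 = 4 * k + 2 from by omega] at h; exact h.symm
      have e4 : pvFib (4 * k + 2) + pvFib (4 * k + 3) = pvFib (4 * k + 4) := by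
        have h := pvFib_at (4 * k + 2) (4 * k + 4) (by omega)
        rw [show 4 * k + 2 + 1 = 4 * k + 3 from by omega] at h; exact h.symm
      have e5 : pvFib (4 * k + 3) + pvFib (4 * k + 4) = pvFib (4 * k + 5) := by
        have h := pvFib_at (4 * k + 3) (4 * k + 5) (by omega)
        rw [show 4 * k + 3 + 1 = 4 * k + 4 from by omega] at h; exact h.symm
      have hv2 : pvFib (4 * k + 2) % 3 = pvFib (4 * k + 1) % 3 := by
        rw [← e2]; omega
      have hne2 : ¬ PySem.Int.mod (pvFib (4 * k + 2)) 3 = 0 := by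
        rw [PySem.Int.mod_eq_emod_of_pos (by omega)]; omega
      have hv3 : pvFib (4 * k + 3) % 3 = 1 ∨ pvFib (4 * k + 3) % 3 = 2 := by
        rw [← e3]; omega
      have hne3 : ¬ PySem.Int.mod (pvFib (4 * k + 3)) 3 = 0 := by
        rw [PySem.Int.mod_eq_emod_of_pos (by omega)]; omega
      rw [show 4 * (j' + 1) + 4 = (4 * (j' + 1) + 3) + 1 from by omega, pvLoopA_succ,
          if_pos hlt', if_neg hne1, e3]
      rw [show 4 * (j' + 1) + 3 = (4 * (j' + 1) + 2) + 1 from by omega, pvLoopA_succ,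
          if_pos hlt', if_neg hne2, e4]
      rw [show 4 * (j' + 1) + 2 = (4 * (j' + 1) + 1) + 1 from by omega, pvLoopA_succ,
          if_pos hlt', if_neg hne3, e5]
      rw [show pvFib (4 * k + 4) = pvFib (4 * (k + 1)) from by rw [show 4 * k + 4 = 4 * (k + 1) from by omega],
          show pvFib (4 * k + 5) = pvFib (4 * (k + 1) + 1) from by rw [show 4 * k + 5 = 4 * (k + 1) + 1 from by omega]]
      rw [ih (k + 1) (acc ++ [pvFib (4 * k)]) n]
      rw [List.append_assoc]
      congr 1
      rw [List.singleton_append]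
      exact pvMapShift (j' + 1) k

lemma pvLoopB_spec (m : Nat) : ∀ (k : Nat) (res : List Int),
    pvLoopB m res (pvFib (4 * k)) (pvFib (4 * k + 4)) =
      res ++ (List.range m).map (fun i => pvFib (4 * (k + i))) := by
  induction m with
  | zero => intro k res; simp [pvLoopB]
  | succ m ih =>
    intro k res
    show pvLoopB m (res ++ [pvFib (4 * k)]) (pvFib (4 * k + 4))
        (7 * pvFib (4 * k + 4) - pvFib (4 * k)) = _
    have h8 : 7 * pvFib (4 * k + 4) - pvFib (4 * k) = pvFib (4 * k + 8) :=
      (pvFib_add8 (4 * k)).symm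
    rw [h8,
        show pvFib (4 * k + 8) = pvFib (4 * (k + 1) + 4) from by rw [show 4 * k + 8 = 4 * (k + 1) + 4 from by omega],
        show pvFib (4 * k + 4) = pvFib (4 * (k + 1)) from by rw [show 4 * k + 4 = 4 * (k + 1) from by omega]]
    rw [ih (k + 1) (res ++ [pvFib (4 * k)])]
    rw [List.append_assoc]
    congr 1
    rw [List.singleton_append]
    exact pvMapShift m k

-- ===== VERDICT (by name: the statement is the Claim_ definition above) =====
theorem fibonacci_numbers_divisible_by_three_spec : Claim_equal_fibonacci_numbers_divisible_by_three := by
  intro n _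
  unfold Spec_fibonacci_numbers_divisible_by_three
  unfold fibonacci_numbers_divisible_by_three fibonacci_numbers_divisible_by_three_alt
  by_cases hn : n ≤ 0
  · have h0 : n.toNat = 0 := by omega
    rw [h0]
    simp [pvLoopA_succ, pvLoopB]
    intro h; omega
  · have hcast : ((n.toNat : Int)) = n := by omega
    have hA := pvLoopA_spec n.toNat 0 [] n
    have hB := pvLoopB_spec n.toNat 0 []
    rw [show pvFib (4 * 0) = 0 from rfl, show pvFib (4 * 0 + 1) = 1 from rfl, hcast,
        show n - n = 0 from by ring] at hA
    rw [show pvFib (4 * 0) = 0 from rfl, show pvFib (4 * 0 + 4) = 3 from rfl] at hB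
    rw [hA, hB]
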